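-- pv_equiv track=rewrite | github.com/Drdevstrange/NLP-Token-Classification | bilstm_web_service.py | preprocess_text
-- ===== SOURCE A (Python) =====
-- def preprocess_text(text):
--     # Split into tokens more carefully, handling punctuation
--     tokens = []
--     for word in text.strip().split():
--         # Handle potential abbreviations carefully
--         if word.isupper() and len(word) >= 2:  # Likely an abbreviation
--             tokens.append(word)
--         else:
--             # Split on punctuation but keep abbreviations together
--             current_token = ""
--             for char in word:
--                 if char.isalnum() or char in ['-', '_']:
--                     current_token += char
--                 elif current_token:
--                     tokens.append(current_token)
--                     current_token = ""
--             if current_token: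
--                 tokens.append(current_token)
--     return tokens
-- ===== SOURCE B (Python) =====
-- from itertools import groupby
--
--
-- def preprocess_text(text):
--     # Same tokenization, but the inner character accumulator loop is replaced
--     # by itertools.groupby: maximal runs of token characters, no manual buffer.
--     tokens = []
--     for word in text.strip().split():
--         if word.isupper() and len(word) >= 2:  # Likely an abbreviation
--             tokens.append(word)
--         else:
--             for key, group in groupby(word, key=lambda c: c.isalnum() or c in ('-', '_')):
--                 if key:
--                     tokens.append(''.join(group))
--     return tokens
-- ===== Notes on version B (the rewrite author's own statement) =====
-- stated objective: simpler
-- what changed: The char-by-char accumulator loop with manual buffer flushes is replaced by itertools.groupby over the same token-character predicate, appending each run whose key is true; no running buffer or flush logic remains.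
import Mathlib
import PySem

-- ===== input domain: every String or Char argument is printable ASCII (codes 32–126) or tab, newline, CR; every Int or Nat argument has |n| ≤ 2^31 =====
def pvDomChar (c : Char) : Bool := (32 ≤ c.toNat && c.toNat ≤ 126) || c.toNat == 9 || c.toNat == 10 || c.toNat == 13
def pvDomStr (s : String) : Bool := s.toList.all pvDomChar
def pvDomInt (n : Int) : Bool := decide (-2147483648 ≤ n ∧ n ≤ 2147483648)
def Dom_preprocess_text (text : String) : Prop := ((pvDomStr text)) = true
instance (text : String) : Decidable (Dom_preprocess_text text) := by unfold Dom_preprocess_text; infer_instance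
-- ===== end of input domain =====

-- B replaces A's char-by-char accumulator loop (manual buffer + flushes) with a
-- groupby over the same token-character predicate; objective: simpler.

-- shared helpers: the token-character predicate and word.isupper() (identical in A and B)
def pvTok (c : Char) : Bool := PySem.Chars.isalnum c || c == '-' || c == '_'

-- word.isupper(): at least one cased char and no lowercase char (exact on ASCII)
def pvIsUpper (cs : List Char) : Bool :=
  cs.any (fun c => PySem.Chars.isupper c || PySem.Chars.islower c) &&
  cs.all (fun c => !PySem.Chars.islower c)

-- ===== PORT A =====
def pvAStep (p : List String × List Char) (c : Char) : List String × List Char :=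
  if pvTok c then (p.1, p.2 ++ [c])
  else if p.2 ≠ [] then (p.1 ++ [String.ofList p.2], []) else p

-- the trailing 'if current_token: tokens.append(current_token)'
def pvFlush (st : List String × List Char) : List String :=
  if st.2 ≠ [] then st.1 ++ [String.ofList st.2] else st.1

def pvAWord (tokens : List String) (word : List Char) : List String :=
  pvFlush (word.foldl pvAStep (tokens, []))

def preprocess_text (text : String) : List String :=
  (PySem.Chars.split₀ (PySem.Chars.strip text.toList)).foldl
    (fun tokens word =>
      if pvIsUpper word && decide (2 ≤ word.length) then tokens ++ [String.ofList word]
      else pvAWord tokens word) []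

-- ===== PORT B =====
-- itertools.groupby(word, key): (key-value, maximal run of equal key) pairs
def pvGroupby (key : Char → Bool) : List Char → List (Bool × List Char)
  | [] => []
  | c :: cs =>
      (key c, c :: cs.takeWhile (fun x => key x == key c)) ::
        pvGroupby key (cs.dropWhile (fun x => key x == key c))
termination_by cs => cs.length
decreasing_by simpa using Nat.lt_succ_of_le (List.length_dropWhile_le _ _)

def preprocess_text_alt (text : String) : List String :=
  (PySem.Chars.split₀ (PySem.Chars.strip text.toList)).foldl
    (fun tokens word =>
      if pvIsUpper word && decide (2 ≤ word.length) then tokens ++ [String.ofList word]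
      else tokens ++ (pvGroupby pvTok word).filterMap
        (fun g => if g.1 then some (String.ofList g.2) else none)) []

-- ===== PRECONDITION & SPEC =====
def Spec_preprocess_text (text : String) (out : List String) : Prop := out = preprocess_text_alt text
instance (text : String) (out : List String) : Decidable (Spec_preprocess_text text out) := by unfold Spec_preprocess_text; infer_instance

-- ===== CLAIM (what is proved, stated in full; the proofs are below) =====
def Claim_equal_preprocess_text : Prop := ∀ (text : String), Dom_preprocess_text text → Spec_preprocess_text text (preprocess_text text)

-- ===== LEMMAS AND PROOFS =====

-- the maximal runs of token characters in a word (proof-side characterisation)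
def pvToks : List Char → List (List Char)
  | [] => []
  | c :: cs =>
      if pvTok c then (c :: cs.takeWhile pvTok) :: pvToks (cs.dropWhile pvTok)
      else pvToks cs
termination_by cs => cs.length
decreasing_by
  · simpa using Nat.lt_succ_of_le (List.length_dropWhile_le _ _)
  · simp

lemma pvToks_dropWhile (cs : List Char) :
    pvToks (cs.dropWhile (fun x => !pvTok x)) = pvToks cs := by
  induction cs with
  | nil => rfl
  | cons d ds ih =>
    by_cases hd : pvTok d
    · simp [hd]
    · simp only [List.dropWhile_cons, hd]
      rw [pvToks]
      simp [hd, ih]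

lemma pvA_fold (word : List Char) : ∀ (tokens : List String) (cur : List Char),
    pvFlush (word.foldl pvAStep (tokens, cur)) =
      tokens ++ (if cur = [] then (pvToks word).map String.ofList
                 else String.ofList (cur ++ word.takeWhile pvTok) ::
                      (pvToks (word.dropWhile pvTok)).map String.ofList) := by
  induction word with
  | nil =>
    intro tokens cur
    cases cur <;> simp [pvFlush, pvToks]
  | cons c cs ih =>
    intro tokens cur
    simp only [List.foldl_cons]
    by_cases hc : pvTok c
    · rw [show pvAStep (tokens, cur) c = (tokens, cur ++ [c]) by simp [pvAStep, hc]]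
      rw [ih tokens (cur ++ [c])]
      cases cur with
      | nil =>
        rw [pvToks]
        simp [hc]
      | cons a as =>
        simp [hc]
    · have hT : pvToks (c :: cs) = pvToks cs := by rw [pvToks]; simp [hc]
      cases cur with
      | nil =>
        rw [show pvAStep (tokens, ([] : List Char)) c = (tokens, []) by simp [pvAStep, hc]]
        rw [ih tokens []]
        simp [hT]
      | cons a as =>
        rw [show pvAStep (tokens, a :: as) c = (tokens ++ [String.ofList (a :: as)], []) by
              simp [pvAStep, hc]]
        rw [ih (tokens ++ [String.ofList (a :: as)]) []]
        simp [hc, hT]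

lemma pvB_word (word : List Char) :
    (pvGroupby pvTok word).filterMap (fun g => if g.1 then some (String.ofList g.2) else none) =
      (pvToks word).map String.ofList := by
  induction word using pvGroupby.induct pvTok with
  | case1 => simp [pvGroupby, pvToks]
  | case2 c cs ih =>
    rw [pvGroupby]
    by_cases hc : pvTok c
    · simp only [hc, beq_true] at ih ⊢
      rw [pvToks]
      simp [hc, ih]
    · have hT : pvToks (c :: cs) = pvToks cs := by rw [pvToks]; simp [hc]
      simp only [Bool.not_eq_true] at hc
      simp only [hc, beq_false] at ih ⊢
      simp only [List.filterMap_cons]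
      rw [ih, pvToks_dropWhile, hT]
      simp

-- ===== VERDICT (by name: the statement is the Claim_ definition above) =====
theorem preprocess_text_spec : Claim_equal_preprocess_text := by
  intro text _
  unfold Spec_preprocess_text preprocess_text preprocess_text_alt
  congr 1
  funext tokens word
  by_cases h : (pvIsUpper word && decide (2 ≤ word.length)) = true
  · simp [h]
  · simp only [h, if_false, Bool.false_eq_true]
    rw [pvAWord, pvA_fold word tokens [], pvB_word]
    simp
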